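-- pv_equiv track=rewrite | github.com/decoct-io/decoct | src/decoct/compress.py | _find_list_identity_fields
-- ===== SOURCE A (Python) =====
-- from typing import TYPE_CHECKING, Any
--
-- def _find_list_identity_fields(instances: list[dict[str, Any]]) -> list[str]:
--     """Fields present in all instances with all-unique values (within cluster)."""
--     if len(instances) < 2:
--         return []
--
--     shared = set(instances[0].keys())
--     for inst in instances[1:]:
--         shared &= set(inst.keys())
--
--     id_fields: list[str] = []
--     for field in sorted(shared):
--         sigs: set[tuple[str, str]] = set()
--         unique = True
--         for inst in instances:
--             sig = (type(inst[field]).__name__, repr(inst[field]))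
--             if sig in sigs:
--                 unique = False
--                 break
--             sigs.add(sig)
--         if unique:
--             id_fields.append(field)
--
--     return id_fields
-- ===== SOURCE B (Python) =====
-- def _find_list_identity_fields(instances):
--     """Fields present in all instances with all-unique values (within cluster)."""
--     if len(instances) < 2:
--         return []
--     table = {}
--     for inst in instances:
--         for field, value in inst.items():
--             table.setdefault(field, []).append((type(value).__name__, repr(value)))
--     n = len(instances)
--     return [f for f in sorted(table)
--             if len(table[f]) == n and len(set(table[f])) == n]
-- ===== Notes on version B (the rewrite author's own statement) =====
-- stated objective: alternative
-- what changed: Replaces A's key-set intersections plus a per-field rescan of all instances (with an early break) by a single pass that builds one field-to-signature-list table, then filters the sorted table keys by presence count and signature-list distinctness.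
import Mathlib
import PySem

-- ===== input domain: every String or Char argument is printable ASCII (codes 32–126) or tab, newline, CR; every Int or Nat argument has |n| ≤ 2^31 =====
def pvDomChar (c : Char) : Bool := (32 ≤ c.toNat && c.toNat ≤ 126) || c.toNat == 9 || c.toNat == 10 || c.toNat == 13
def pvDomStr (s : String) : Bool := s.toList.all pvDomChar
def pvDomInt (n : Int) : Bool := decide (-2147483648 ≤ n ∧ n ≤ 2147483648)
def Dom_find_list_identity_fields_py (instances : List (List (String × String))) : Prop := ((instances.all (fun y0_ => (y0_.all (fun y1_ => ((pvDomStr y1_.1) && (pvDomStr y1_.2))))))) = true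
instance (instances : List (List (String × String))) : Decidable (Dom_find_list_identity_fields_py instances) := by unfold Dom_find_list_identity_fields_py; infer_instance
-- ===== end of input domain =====

-- B builds one field → signature-list table in a single pass and filters the sorted keys,
-- replacing A's key-set intersections and per-field rescans with a break; objective: alternative decomposition.

-- ===== PORT A =====
-- A's inner per-field loop: scan instances, collect signatures in a set, break (return false) on a repeat.
-- Values here are Python str; type(v).__name__ is always "str" and repr is injective on str,
-- so the signature ("str", v) is exact for these membership tests.
def pvASig (inst : List (String × String)) (field : String) : String × String :=
  ("str", (List.lookup field inst).getD "")  -- inst[field]: first-match lookup; only used when field is a shared key, so it never misses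

def pvAUnique (field : String) : List (List (String × String)) → PySem.Set (String × String) → Bool
  | [], _ => true
  | inst :: rest, sigs =>
    let sig := pvASig inst field
    if PySem.Set.contains sigs sig then false
    else pvAUnique field rest (PySem.Set.add sigs sig)

def find_list_identity_fields_py (instances : List (List (String × String))) : List String :=
  if instances.length < 2 then []
  else
    let shared := (PySem.List.slice instances (some 1) none).foldl
      (fun s inst => PySem.Set.inter s (PySem.Set.ofList (inst.map Prod.fst)))
      (PySem.Set.ofList ((PySem.List.pyGetD instances 0 []).map Prod.fst))
    (PySem.List.sorted shared (fun x => x) false).foldl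
      (fun acc field => if pvAUnique field instances PySem.Set.empty then acc ++ [field] else acc)
      []

-- ===== PORT B =====
-- table[field] = list of signatures of field across instances (one table-building pass; setdefault/append = modify)
def pvBTable (instances : List (List (String × String))) : PySem.Dict String (List (String × String)) :=
  instances.foldl
    (fun d inst => inst.foldl (fun d p => d.modify p.1 [] (fun l => l ++ [("str", p.2)])) d)
    PySem.Dict.empty

def find_list_identity_fields_py_alt (instances : List (List (String × String))) : List String :=
  if instances.length < 2 then []
  else
    let table := pvBTable instances
    let n := instances.length
    (PySem.List.sorted (PySem.Dict.keys table) (fun x => x) false).filter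
      (fun f => (table.getD f []).length == n && (PySem.Set.ofList (table.getD f [])).length == n)

-- ===== PRECONDITION & SPEC =====
-- Pre_ excludes association lists in which some instance has a duplicate key: such a list does not
-- represent a Python dict (A's parameter type), so no claim is made about it.
def Pre_find_list_identity_fields_py (instances : List (List (String × String))) : Prop :=
  ∀ inst ∈ instances, (inst.map Prod.fst).Nodup
instance (instances : List (List (String × String))) : Decidable (Pre_find_list_identity_fields_py instances) := by unfold Pre_find_list_identity_fields_py; infer_instance

def pvWitness_find_list_identity_fields_py : (List (List (String × String))) :=
  [[("a", "x"), ("b", "y")], [("a", "z")]]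

def Spec_find_list_identity_fields_py (instances : List (List (String × String))) (out : List String) : Prop := out = find_list_identity_fields_py_alt instances
instance (instances : List (List (String × String))) (out : List String) : Decidable (Spec_find_list_identity_fields_py instances out) := by unfold Spec_find_list_identity_fields_py; infer_instance

-- ===== CLAIM (what is proved, stated in full; the proofs are below) =====
def Claim_equal_find_list_identity_fields_py : Prop := ∀ (instances : List (List (String × String))), Dom_find_list_identity_fields_py instances → Pre_find_list_identity_fields_py instances → Spec_find_list_identity_fields_py instances (find_list_identity_fields_py instances)

-- ===== LEMMAS AND PROOFS =====

-- the signatures field contributes from one instance (0 or 1 of them for a dict-valid instance)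
def pvEntry (f : String) (inst : List (String × String)) : List (String × String) :=
  (inst.filter (fun p => p.1 == f)).map (fun p => (("str", p.2) : String × String))

def pvOccs (f : String) (instances : List (List (String × String))) : List (String × String) :=
  instances.flatMap (pvEntry f)

lemma pv_filter_lookup (l : List (String × String)) (f : String) (h : (l.map Prod.fst).Nodup) :
    l.filter (fun p => p.1 == f) = (List.lookup f l).elim [] (fun v => [(f, v)]) := by
  induction l with
  | nil => rfl
  | cons p t ih =>
    simp only [List.map_cons, List.nodup_cons] at h
    simp only [List.filter_cons, List.lookup]
    by_cases hp : p.1 = f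
    · subst hp
      have ht : t.filter (fun q => q.1 == p.1) = [] := by
        rw [List.filter_eq_nil_iff]
        intro q hq hb
        exact h.1 ((beq_iff_eq.mp hb) ▸ List.mem_map_of_mem hq)
      simp [ht]
    · have hb : (f == p.1) = false := by simpa using Ne.symm hp
      simp [hp, hb, ih h.2, beq_iff_eq]

lemma pv_entry_of_mem (inst : List (String × String)) (f : String)
    (h : (inst.map Prod.fst).Nodup) (hm : f ∈ inst.map Prod.fst) :
    pvEntry f inst = [pvASig inst f] := by
  have hv : ∃ v, List.lookup f inst = some v := by
    induction inst with
    | nil => simp at hm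
    | cons p t ih =>
      simp only [List.map_cons, List.mem_cons] at hm
      by_cases hp : f = p.1
      · exact ⟨p.2, by simp [List.lookup, hp]⟩
      · have hb : (f == p.1) = false := by simpa using hp
        obtain ⟨v, hv⟩ := ih (by
          simp only [List.map_cons, List.nodup_cons] at h
          exact h.2) (by
          rcases hm with h1 | h1
          · exact absurd h1 hp
          · exact h1)
        exact ⟨v, by simp [List.lookup, hb, hv]⟩
  obtain ⟨v, hv⟩ := hv
  simp [pvEntry, pv_filter_lookup inst f h, hv, pvASig]

lemma pv_entry_of_not_mem (inst : List (String × String)) (f : String)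
    (hm : f ∉ inst.map Prod.fst) : pvEntry f inst = [] := by
  have : inst.filter (fun p => p.1 == f) = [] := by
    rw [List.filter_eq_nil_iff]
    intro p hp hb
    exact hm ((beq_iff_eq.mp hb) ▸ List.mem_map_of_mem hp)
  simp [pvEntry, this]

lemma pv_table_getD (instances : List (List (String × String)))
    (d : PySem.Dict String (List (String × String))) (f : String) :
    (instances.foldl
      (fun d inst => inst.foldl (fun d p => d.modify p.1 [] (fun l => l ++ [("str", p.2)])) d)
      d).getD f []
    = d.getD f [] ++ pvOccs f instances := by
  induction instances generalizing d with
  | nil => simp [pvOccs]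
  | cons inst rest ih =>
    have hinner : (inst.foldl (fun d p => d.modify p.1 [] (fun l => l ++ [("str", p.2)])) d).getD f []
        = d.getD f [] ++ pvEntry f inst := by
      have hmap : inst.foldl (fun d p => d.modify p.1 [] (fun l => l ++ [("str", p.2)])) d
          = (inst.map (fun p => (p.1, (("str", p.2) : String × String)))).foldl
              (fun d q => d.modify q.1 [] (fun l => l ++ [q.2])) d := by
        rw [List.foldl_map]
      rw [hmap, PySem.Dict.getD_foldl_modify_append]
      have : List.filter (fun q => q.1 == f) (inst.map (fun p => (p.1, (("str", p.2) : String × String))))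
          = (inst.filter (fun p => p.1 == f)).map (fun p => (p.1, (("str", p.2) : String × String))) := by
        rw [List.filter_map]; rfl
      rw [this, List.map_map, pvEntry]
      rfl
    simp only [List.foldl_cons, List.flatMap_cons, pvOccs] at *
    rw [ih, hinner, List.append_assoc]

lemma pv_table_keys_mem (instances : List (List (String × String)))
    (d : PySem.Dict String (List (String × String))) (f : String) :
    (f ∈ (instances.foldl
      (fun d inst => inst.foldl (fun d p => d.modify p.1 [] (fun l => l ++ [("str", p.2)])) d)
      d).keys)
    ↔ (f ∈ d.keys ∨ ∃ inst ∈ instances, f ∈ inst.map Prod.fst) := by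
  induction instances generalizing d with
  | nil => simp
  | cons inst rest ih =>
    have hinner : (inst.foldl (fun d p => d.modify p.1 [] (fun l => l ++ [("str", p.2)])) d).keys
        = PySem.Set.update d.keys (inst.map Prod.fst) := by
      exact PySem.Dict.keys_foldl_modify_key inst Prod.fst [] (fun _ p => fun l => l ++ [("str", p.2)]) d
    simp only [List.foldl_cons]
    rw [ih, hinner]
    rw [PySem.Set.mem_update]
    constructor
    · rintro (⟨h1 | h1⟩ | ⟨i, hi, hf⟩)
      · exact Or.inl h1
      · exact Or.inr ⟨inst, List.mem_cons_self .., h1⟩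
      · exact Or.inr ⟨i, List.mem_cons_of_mem _ hi, hf⟩
    · rintro (h1 | ⟨i, hi, hf⟩)
      · exact Or.inl (Or.inl h1)
      · rcases List.mem_cons.mp hi with rfl | hi
        · exact Or.inl (Or.inr hf)
        · exact Or.inr ⟨i, hi, hf⟩

lemma pv_table_keys_nodup (instances : List (List (String × String)))
    (d : PySem.Dict String (List (String × String))) (h : d.keys.Nodup) :
    (instances.foldl
      (fun d inst => inst.foldl (fun d p => d.modify p.1 [] (fun l => l ++ [("str", p.2)])) d)
      d).keys.Nodup := by
  induction instances generalizing d with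
  | nil => exact h
  | cons inst rest ih =>
    simp only [List.foldl_cons]
    apply ih
    have hinner : (inst.foldl (fun d p => d.modify p.1 [] (fun l => l ++ [("str", p.2)])) d).keys
        = PySem.Set.update d.keys (inst.map Prod.fst) := by
      exact PySem.Dict.keys_foldl_modify_key inst Prod.fst [] (fun _ p => fun l => l ++ [("str", p.2)]) d
    rw [hinner]
    exact PySem.Set.nodup_update _ _ h

lemma pv_occs_len_le (f : String) (instances : List (List (String × String)))
    (hpre : ∀ inst ∈ instances, (inst.map Prod.fst).Nodup) :
    (pvOccs f instances).length ≤ instances.length := by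
  induction instances with
  | nil => simp [pvOccs]
  | cons inst rest ih =>
    simp only [pvOccs, List.flatMap_cons, List.length_append, List.length_cons]
    have h1 : (pvEntry f inst).length ≤ 1 := by
      by_cases hm : f ∈ inst.map Prod.fst
      · rw [pv_entry_of_mem inst f (hpre inst (List.mem_cons_self ..)) hm]; simp
      · rw [pv_entry_of_not_mem inst f hm]; simp
    have h2 := ih (fun i hi => hpre i (List.mem_cons_of_mem _ hi))
    simp only [pvOccs] at h2
    omega

lemma pv_occs_len_eq_iff (f : String) (instances : List (List (String × String)))
    (hpre : ∀ inst ∈ instances, (inst.map Prod.fst).Nodup) :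
    (pvOccs f instances).length = instances.length ↔ ∀ inst ∈ instances, f ∈ inst.map Prod.fst := by
  induction instances with
  | nil => simp [pvOccs]
  | cons inst rest ih =>
    simp only [pvOccs, List.flatMap_cons, List.length_append, List.length_cons]
    have hrest := ih (fun i hi => hpre i (List.mem_cons_of_mem _ hi))
    have hle := pv_occs_len_le f rest (fun i hi => hpre i (List.mem_cons_of_mem _ hi))
    simp only [pvOccs] at hrest hle
    by_cases hm : f ∈ inst.map Prod.fst
    · rw [pv_entry_of_mem inst f (hpre inst (List.mem_cons_self ..)) hm]
      simp only [List.length_cons, List.length_nil]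
      constructor
      · intro hl i hi
        rcases List.mem_cons.mp hi with rfl | hi
        · exact hm
        · exact (hrest.mp (by omega)) i hi
      · intro hall
        have := hrest.mpr (fun i hi => hall i (List.mem_cons_of_mem _ hi))
        omega
    · rw [pv_entry_of_not_mem inst f hm]
      simp only [List.length_nil]
      constructor
      · intro hl; omega
      · intro hall; exact absurd (hall inst (List.mem_cons_self ..)) hm

lemma pv_occs_of_all_mem (f : String) (instances : List (List (String × String)))
    (hpre : ∀ inst ∈ instances, (inst.map Prod.fst).Nodup)
    (hall : ∀ inst ∈ instances, f ∈ inst.map Prod.fst) :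
    pvOccs f instances = instances.map (fun inst => pvASig inst f) := by
  induction instances with
  | nil => simp [pvOccs]
  | cons inst rest ih =>
    simp only [pvOccs, List.flatMap_cons, List.map_cons]
    rw [pv_entry_of_mem inst f (hpre inst (List.mem_cons_self ..)) (hall inst (List.mem_cons_self ..))]
    have := ih (fun i hi => hpre i (List.mem_cons_of_mem _ hi)) (fun i hi => hall i (List.mem_cons_of_mem _ hi))
    simp only [pvOccs] at this
    rw [this]
    rfl

lemma pv_aUnique_iff (f : String) (insts : List (List (String × String)))
    (sigs : PySem.Set (String × String)) :
    pvAUnique f insts sigs = true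
    ↔ ((insts.map (fun i => pvASig i f)).Nodup ∧ ∀ x ∈ insts.map (fun i => pvASig i f), x ∉ sigs) := by
  induction insts generalizing sigs with
  | nil => simp [pvAUnique]
  | cons inst rest ih =>
    simp only [pvAUnique, List.map_cons]
    by_cases hc : PySem.Set.contains sigs (pvASig inst f) = true
    · have hmem : pvASig inst f ∈ sigs := (PySem.Set.contains_iff _ _).mp hc
      simp only [hc, if_true, Bool.false_eq_true, false_iff, not_and]
      intro hnd hdisj
      exact (hdisj _ (List.mem_cons_self ..)) hmem
    · have hnmem : pvASig inst f ∉ sigs := fun h => hc ((PySem.Set.contains_iff _ _).mpr h)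
      simp only [hc, if_false, Bool.false_eq_true]
      rw [ih]
      constructor
      · rintro ⟨hnd, hdisj⟩
        refine ⟨List.nodup_cons.mpr ⟨fun h => ?_, hnd⟩, ?_⟩
        · exact absurd ((PySem.Set.mem_add sigs _ _).mpr (Or.inr rfl)) (hdisj _ h)
        · intro x hx
          rcases List.mem_cons.mp hx with rfl | hx
          · exact hnmem
          · intro hxs
            exact (hdisj x hx) ((PySem.Set.mem_add sigs _ _).mpr (Or.inl hxs))
      · rintro ⟨hnd, hdisj⟩
        obtain ⟨hhead, htail⟩ := List.nodup_cons.mp hnd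
        refine ⟨htail, fun x hx hxadd => ?_⟩
        rcases (PySem.Set.mem_add sigs _ _).mp hxadd with hxs | rfl
        · exact (hdisj x (List.mem_cons_of_mem _ hx)) hxs
        · exact hhead hx

lemma pv_ofList_len_iff (l : List (String × String)) :
    ((PySem.Set.ofList l).length = l.length) ↔ l.Nodup := by
  constructor
  · intro hlen
    by_contra hnd
    have hlt : ∀ (l : List (String × String)), ¬ l.Nodup → (PySem.Set.ofList l).length < l.length := by
      intro l
      induction l with
      | nil => intro h; exact absurd List.nodup_nil h
      | cons x xs ih =>
        intro h
        rw [PySem.Set.ofList_cons]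
        simp only [List.length_cons]
        have hfil : (PySem.Set.ofList xs).discard x = List.filter (fun y => !y == x) (PySem.Set.ofList xs) :=
          PySem.Set.discard.eq_1 _ _
        by_cases hx : x ∈ xs
        · have hxo : x ∈ PySem.Set.ofList xs := (PySem.Set.mem_ofList xs x).mpr hx
          have : ((PySem.Set.ofList xs).discard x).length < (PySem.Set.ofList xs).length := by
            rw [hfil]
            apply List.length_filter_lt_length_iff_exists.mpr
            exact ⟨x, hxo, by simp⟩
          have := PySem.Set.length_ofList_le xs
          omega
        · have hnx : ¬ xs.Nodup := fun hnd2 => h (List.nodup_cons.mpr ⟨hx, hnd2⟩)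
          have h1 := ih hnx
          have h2 : ((PySem.Set.ofList xs).discard x).length ≤ (PySem.Set.ofList xs).length := by
            rw [hfil]; exact List.length_filter_le _ _
          omega
    have := hlt l hnd
    omega
  · intro h
    rw [PySem.Set.ofList_eq_self_of_nodup l h]

lemma pv_shared_mem (rest : List (List (String × String))) (s : PySem.Set String) (f : String) :
    (f ∈ rest.foldl (fun s inst => PySem.Set.inter s (PySem.Set.ofList (inst.map Prod.fst))) s)
    ↔ (f ∈ s ∧ ∀ inst ∈ rest, f ∈ inst.map Prod.fst) := by
  induction rest generalizing s with
  | nil => simp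
  | cons inst rest ih =>
    simp only [List.foldl_cons]
    rw [ih]
    rw [PySem.Set.mem_inter, PySem.Set.mem_ofList]
    constructor
    · rintro ⟨⟨hs, hm⟩, hall⟩
      refine ⟨hs, fun i hi => ?_⟩
      rcases List.mem_cons.mp hi with rfl | hi
      · exact hm
      · exact hall i hi
    · rintro ⟨hs, hall⟩
      exact ⟨⟨hs, hall inst (List.mem_cons_self ..)⟩, fun i hi => hall i (List.mem_cons_of_mem _ hi)⟩

lemma pv_shared_nodup (rest : List (List (String × String))) (s : PySem.Set String) (h : List.Nodup s) :
    List.Nodup (rest.foldl (fun s inst => PySem.Set.inter s (PySem.Set.ofList (inst.map Prod.fst))) s) := by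
  induction rest generalizing s with
  | nil => exact h
  | cons inst rest ih =>
    simp only [List.foldl_cons]
    exact ih _ (PySem.Set.nodup_inter _ _ h)

lemma pv_pairwise_lt_of_nodup (l : List String) (h : l.Pairwise (· ≤ ·)) (hn : l.Nodup) :
    l.Pairwise (· < ·) := by
  have := h.and hn
  exact this.imp (fun hab => lt_of_le_of_ne hab.1 hab.2)

lemma pv_filter_eq (i0 : List (String × String)) (rest : List (List (String × String)))
    (hpre : ∀ inst ∈ (i0 :: rest), (inst.map Prod.fst).Nodup) (a : String) :
    ((a ∈ PySem.Set.ofList (i0.map Prod.fst) ∧ ∀ inst ∈ rest, a ∈ inst.map Prod.fst)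
      ∧ pvAUnique a (i0 :: rest) PySem.Set.empty = true)
    ↔ ((∃ inst ∈ (i0 :: rest), a ∈ inst.map Prod.fst)
      ∧ ((pvOccs a (i0 :: rest)).length = (i0 :: rest).length
         ∧ (PySem.Set.ofList (pvOccs a (i0 :: rest))).length = (i0 :: rest).length)) := by
  rw [PySem.Set.mem_ofList]
  have hall : (a ∈ i0.map Prod.fst ∧ ∀ inst ∈ rest, a ∈ inst.map Prod.fst)
      ↔ ∀ inst ∈ (i0 :: rest), a ∈ inst.map Prod.fst := by
    constructor
    · rintro ⟨h0, hr⟩ i hi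
      rcases List.mem_cons.mp hi with rfl | hi
      · exact h0
      · exact hr i hi
    · intro h
      exact ⟨h i0 (List.mem_cons_self ..), fun i hi => h i (List.mem_cons_of_mem _ hi)⟩
  rw [hall, pv_aUnique_iff]
  have hempty : (∀ x ∈ (i0 :: rest).map (fun i => pvASig i a), x ∉ (PySem.Set.empty : PySem.Set (String × String))) := by
    intro x _ hx
    simp [PySem.Set.empty] at hx
  constructor
  · rintro ⟨hmem, hnd, -⟩
    have hocc := pv_occs_of_all_mem a (i0 :: rest) hpre hmem
    have hlen : (pvOccs a (i0 :: rest)).length = (i0 :: rest).length := by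
      rw [hocc, List.length_map]
    refine ⟨⟨i0, List.mem_cons_self .., hmem i0 (List.mem_cons_self ..)⟩, hlen, ?_⟩
    rw [(pv_ofList_len_iff _).symm.mp (hocc ▸ hnd)]
    exact hlen
  · rintro ⟨-, hlen, hset⟩
    have hmem := (pv_occs_len_eq_iff a (i0 :: rest) hpre).mp hlen
    have hocc := pv_occs_of_all_mem a (i0 :: rest) hpre hmem
    refine ⟨hmem, ?_, hempty⟩
    rw [← hocc]
    exact (pv_ofList_len_iff _).mp (by omega)

lemma pv_main (i0 : List (String × String)) (rest : List (List (String × String)))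
    (hpre : ∀ inst ∈ (i0 :: rest), (inst.map Prod.fst).Nodup)
    (hlen : ¬ (i0 :: rest).length < 2) :
    find_list_identity_fields_py (i0 :: rest) = find_list_identity_fields_py_alt (i0 :: rest) := by
  unfold find_list_identity_fields_py find_list_identity_fields_py_alt pvBTable
  simp only [hlen, if_false]
  rw [PySem.List.slice_from_one]
  have hget : PySem.List.pyGetD (i0 :: rest) 0 [] = i0 := by
    simp [pysem]
  rw [hget]
  simp only [List.tail_cons]
  -- name the two sorted base lists
  set shared := rest.foldl (fun s inst => PySem.Set.inter s (PySem.Set.ofList (inst.map Prod.fst)))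
      (PySem.Set.ofList (i0.map Prod.fst)) with hshared
  rw [PySem.List.foldl_append_if (fun field => pvAUnique field (i0 :: rest) PySem.Set.empty) (fun x => x)]
  simp only [List.nil_append, List.map_id']
  -- Pairwise (<) of both filtered lists
  have hsortedA : (PySem.List.sorted shared (fun x => x) false).Pairwise (· < ·) := by
    apply pv_pairwise_lt_of_nodup _ (PySem.List.sorted_pairwise shared (fun x => x))
    exact (PySem.List.sorted_perm shared (fun x => x) false).nodup_iff.mpr
      (pv_shared_nodup rest _ (PySem.Set.nodup_ofList _))
  have hsortedB : (PySem.List.sorted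
      ((List.foldl (fun d inst => inst.foldl (fun d p => d.modify p.1 [] (fun l => l ++ [("str", p.2)])) d)
        PySem.Dict.empty (i0 :: rest)).keys) (fun x => x) false).Pairwise (· < ·) := by
    apply pv_pairwise_lt_of_nodup _ (PySem.List.sorted_pairwise _ (fun x => x))
    apply (PySem.List.sorted_perm _ (fun x => x) false).nodup_iff.mpr
    exact pv_table_keys_nodup (i0 :: rest) PySem.Dict.empty (by simp [PySem.Dict.empty, PySem.Dict.keys])
  have hA := hsortedA.filter (fun field => pvAUnique field (i0 :: rest) PySem.Set.empty)
  have hB := hsortedB.filter (fun f =>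
      ((List.foldl (fun d inst => inst.foldl (fun d p => d.modify p.1 [] (fun l => l ++ [("str", p.2)])) d)
        PySem.Dict.empty (i0 :: rest)).getD f []).length == (i0 :: rest).length
      && (PySem.Set.ofList ((List.foldl (fun d inst => inst.foldl (fun d p => d.modify p.1 [] (fun l => l ++ [("str", p.2)])) d)
        PySem.Dict.empty (i0 :: rest)).getD f [])).length == (i0 :: rest).length)
  apply List.Perm.eq_of_pairwise (le := fun a b => a < b)
    (fun a b _ _ hab hba => absurd (lt_trans hab hba) (lt_irrefl a)) hA hB
  rw [List.perm_ext_iff_of_nodup (hA.imp ne_of_lt) (hB.imp ne_of_lt)]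
  intro a
  simp only [List.mem_filter, PySem.List.mem_sorted]
  rw [pv_table_keys_mem, pv_table_getD]
  have hempty0 : (PySem.Dict.empty : PySem.Dict String (List (String × String))).getD a [] = [] := by rfl
  have hkeys0 : a ∉ (PySem.Dict.empty : PySem.Dict String (List (String × String))).keys := by
    simp [PySem.Dict.empty, PySem.Dict.keys]
  rw [hshared, pv_shared_mem]
  constructor
  · rintro ⟨hm, hu⟩
    have := (pv_filter_eq i0 rest hpre a).mp ⟨hm, hu⟩
    refine ⟨Or.inr this.1, ?_⟩
    rw [hempty0, List.nil_append]
    simp only [Bool.and_eq_true, beq_iff_eq]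
    exact this.2
  · rintro ⟨hk, hcond⟩
    rw [hempty0, List.nil_append] at hcond
    simp only [Bool.and_eq_true, beq_iff_eq] at hcond
    have hk' : ∃ inst ∈ (i0 :: rest), a ∈ inst.map Prod.fst := by
      rcases hk with hk | hk
      · exact absurd hk hkeys0
      · exact hk
    exact (pv_filter_eq i0 rest hpre a).mpr ⟨hk', hcond⟩

-- ===== VERDICT (by name: the statement is the Claim_ definition above) =====
theorem find_list_identity_fields_py_spec : Claim_equal_find_list_identity_fields_py := by
  intro instances _hdom hpre
  unfold Spec_find_list_identity_fields_py
  cases instances with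
  | nil => rfl
  | cons i0 rest =>
    by_cases hlen : (i0 :: rest).length < 2
    · unfold find_list_identity_fields_py find_list_identity_fields_py_alt
      simp only [hlen, if_true]
    · exact pv_main i0 rest hpre hlen
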